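-- pv_equiv track=rewrite | github.com/wooyee-ldq/Public.elective.management.system | Tool/msghiden.py | pid_hide
-- ===== SOURCE A (Python) =====
-- def pid_hide(pid):
--     new_pid = ""
--     i = 0
--     for s in str(pid):
--         i += 1
--         if i > 6:
--             new_pid = new_pid + "*"
--         else:
--             new_pid = new_pid + s
--
--     return new_pid
-- ===== SOURCE B (Python) =====
-- def pid_hide(pid):
--     s = str(pid)
--     return s[:6] + "*" * (len(s) - 6)
-- ===== Notes on version B (the rewrite author's own statement) =====
-- stated objective: simpler
-- what changed: Replaces the character-by-character loop with an indexed counter by a single prefix slice plus one block of asterisks (negative repeat count naturally yields the empty string).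
import Mathlib
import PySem

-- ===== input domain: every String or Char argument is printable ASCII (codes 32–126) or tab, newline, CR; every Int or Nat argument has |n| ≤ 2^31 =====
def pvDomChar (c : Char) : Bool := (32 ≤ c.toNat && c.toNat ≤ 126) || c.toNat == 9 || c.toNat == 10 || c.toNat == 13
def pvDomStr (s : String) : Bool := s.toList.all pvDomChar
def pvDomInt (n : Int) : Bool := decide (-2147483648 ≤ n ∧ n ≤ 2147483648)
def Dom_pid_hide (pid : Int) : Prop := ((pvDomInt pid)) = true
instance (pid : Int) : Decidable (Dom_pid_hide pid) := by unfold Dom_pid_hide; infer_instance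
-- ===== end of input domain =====

-- B replaces A's per-character masking loop by one prefix slice plus one asterisk block (simpler decomposition).

-- ===== PORT A =====
-- loop over str(pid) with counter i; append '*' once i exceeds 6, else the character
def pid_hide (pid : Int) : String :=
  let r := (PySem.Int.toChars pid).foldl
    (fun (st : List Char × Int) s =>
      let i := st.2 + 1
      if i > 6 then (st.1 ++ ['*'], i) else (st.1 ++ [s], i))
    ([], 0)
  String.ofList r.1

-- ===== PORT B =====
-- s[:6] + '*' * (len(s) - 6)
def pid_hide_alt (pid : Int) : String :=
  let s := PySem.Int.toChars pid
  String.ofList (PySem.List.slice s none (some 6) ++ PySem.List.pyRepeat ['*'] ((s.length : Int) - 6))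

-- ===== PRECONDITION & SPEC =====
def Spec_pid_hide (pid : Int) (out : String) : Prop := out = pid_hide_alt pid
instance (pid : Int) (out : String) : Decidable (Spec_pid_hide pid out) := by unfold Spec_pid_hide; infer_instance

-- ===== CLAIM (what is proved, stated in full; the proofs are below) =====
def Claim_equal_pid_hide : Prop := ∀ (pid : Int), Dom_pid_hide pid → Spec_pid_hide pid (pid_hide pid)

-- ===== LEMMAS AND PROOFS =====

theorem pid_hide_fold_mask (l acc : List Char) (n : Nat) :
    (l.foldl
      (fun (st : List Char × Int) s =>
        let i := st.2 + 1
        if i > 6 then (st.1 ++ ['*'], i) else (st.1 ++ [s], i))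
      (acc, (n : Int))).1
    = acc ++ l.take (6 - n) ++ List.replicate (l.length - (6 - n)) '*' := by
  induction l generalizing acc n with
  | nil => simp
  | cons c l ih =>
    simp only [List.foldl_cons]
    by_cases h : (n : Int) + 1 > 6
    · have hn : 6 ≤ n := by omega
      simp only [if_pos h]
      have := ih (acc ++ ['*']) (n + 1)
      rw [show ((n : Int) + 1) = ((n + 1 : Nat) : Int) by push_cast; ring] at *
      rw [this]
      have h1 : 6 - (n + 1) = 0 := by omega
      have h2 : 6 - n = 0 := by omega
      simp [h1, h2, List.replicate_succ]
    · have hn : n < 6 := by omega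
      simp only [if_neg h]
      have := ih (acc ++ [c]) (n + 1)
      rw [show ((n : Int) + 1) = ((n + 1 : Nat) : Int) by push_cast; ring] at *
      rw [this]
      have h1 : 6 - n = (6 - (n + 1)) + 1 := by omega
      have h2 : (c :: l).length - (6 - n) = l.length - (6 - (n + 1)) := by simp; omega
      rw [h2, h1, List.take_succ_cons]
      simp

-- ===== VERDICT (by name: the statement is the Claim_ definition above) =====
theorem pid_hide_spec : Claim_equal_pid_hide := by
  intro pid _
  unfold Spec_pid_hide pid_hide pid_hide_alt
  simp only
  rw [show ((0 : Int)) = ((0 : Nat) : Int) by norm_num, pid_hide_fold_mask]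
  rw [show (6:Int) = ((6:Nat):Int) by norm_num, PySem.List.slice_to_natCast,
     PySem.List.pyRepeat_singleton]
  have : (((PySem.Int.toChars pid).length : Int) - 6).toNat = (PySem.Int.toChars pid).length - 6 := by omega
  simp [this]
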